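-- pv_equiv track=rewrite | github.com/blindtex/blindtex | blindtex/iotools/stringtools.py | cleanDelimiters
-- ===== SOURCE A (Python) =====
-- delimiters = [r'\(', r'\)', r'\[', r'\]', r'\begin{equation}',r'\begin{equation*}',r'\begin{align}',r'\begin{align*}', r'\end{equation}',r'\end{equation*}',r'\end{align}',r'\end{align*}',r'\begin{eqnarray}', r'\begin{eqnarray*}', r'\end{eqnarray}', r'\end{eqnarray*}',]
--
-- def cleanDelimiters(equation):
--     '''This method clean a string from the possible LaTeX equation delimiters to avoid future conflicts.
--             Args:
--                     equation(str): The LaTeX equation.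
--             Returns
--                     str: The same equation without the delimiters in the delimiters list. '''
--     newEquation = equation
--     if(newEquation[0] == '$'):
--     #This part is for the case with delimiters $ or $$, since in the equation could be a \$ we did this to avoid cleaning those to.
--         newEquation = newEquation[1:len(newEquation)-1]
--         #Already cleaned the first and last $ if there is other we pass the cleaner again.
--         return cleanDelimiters(newEquation)
--     else:
--         for delim in delimiters:
--             newEquation = newEquation.replace(delim, '')
--         return newEquation
-- ===== SOURCE B (Python) =====
-- delimiters = [r'\(', r'\)', r'\[', r'\]', r'\begin{equation}',r'\begin{equation*}',r'\begin{align}',r'\begin{align*}', r'\end{equation}',r'\end{equation*}',r'\end{align}',r'\end{align*}',r'\begin{eqnarray}', r'\begin{eqnarray*}', r'\end{eqnarray}', r'\end{eqnarray*}',]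
--
-- def cleanDelimiters(equation):
--     # Count the leading '$' run once, then take a single symmetric slice
--     # (each '$' stripped from the front also strips one char from the back),
--     # instead of recursing with a fresh copy per '$'.
--     k = 0
--     while equation[k] == '$':
--         k += 1
--     newEquation = equation[k:len(equation) - k]
--     for delim in delimiters:
--         newEquation = newEquation.replace(delim, '')
--     return newEquation
-- ===== Notes on version B (the rewrite author's own statement) =====
-- stated objective: alternative
-- what changed: Replaces A's recursion (which re-slices a fresh copy of the string per leading '$') by a single scan that counts the leading '$' run and one symmetric slice, followed by the same replace loop.
import Mathlib
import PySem

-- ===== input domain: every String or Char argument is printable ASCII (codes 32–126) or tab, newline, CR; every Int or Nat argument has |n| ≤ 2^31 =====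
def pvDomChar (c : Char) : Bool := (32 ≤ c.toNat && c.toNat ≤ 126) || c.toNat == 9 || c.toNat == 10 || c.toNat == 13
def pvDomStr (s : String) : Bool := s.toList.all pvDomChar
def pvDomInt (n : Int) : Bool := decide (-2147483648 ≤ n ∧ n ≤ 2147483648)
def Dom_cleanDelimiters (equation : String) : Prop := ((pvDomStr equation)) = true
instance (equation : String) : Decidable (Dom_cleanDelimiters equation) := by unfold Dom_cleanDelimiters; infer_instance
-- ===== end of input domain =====

-- B differs from A structurally: it counts the leading '$' run with one index scan and takes
-- a single symmetric slice, instead of A's recursion with one fresh slice per '$'.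
-- Same return value wherever A returns (Pre_ excludes exactly A's IndexError inputs).

-- the module-level 'delimiters' list
def pvDelims : List (List Char) :=
  ["\\(", "\\)", "\\[", "\\]", "\\begin{equation}", "\\begin{equation*}",
   "\\begin{align}", "\\begin{align*}", "\\end{equation}", "\\end{equation*}",
   "\\end{align}", "\\end{align*}", "\\begin{eqnarray}", "\\begin{eqnarray*}",
   "\\end{eqnarray}", "\\end{eqnarray*}"].map String.toList

-- the shared 'for delim in delimiters: newEquation = newEquation.replace(delim, "")'
def pvReplaceAll (l : List Char) : List Char :=
  pvDelims.foldl (fun acc d => PySem.Chars.replace acc d []) l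

-- ===== PORT A =====
-- 'if newEquation[0] == "$": return cleanDelimiters(newEquation[1:len(newEquation)-1])
--  else: for delim in delimiters: …; return newEquation'
-- The fuel argument only makes the recursion total (each step shrinks the list); with
-- fuel = length+1 it is never exhausted.  Python raises IndexError on the empty string
-- (pyGet? = none); those inputs are excluded by Pre_ below.
def pvCleanAAux : Nat → List Char → List Char
  | 0, l => l
  | fuel + 1, l =>
    if PySem.List.pyGet? l 0 = some '$' then
      pvCleanAAux fuel (PySem.List.slice l (some 1) (some ((l.length : Int) - 1)))
    else
      pvReplaceAll l

def cleanDelimiters (equation : String) : String :=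
  String.ofList (pvCleanAAux (equation.toList.length + 1) equation.toList)

-- ===== PORT B =====
-- 'k = 0; while equation[k] == "$": k += 1'; fuel only for totality (the scan stops at
-- the first non-'$' or, like Python's IndexError, when it runs off the end).
def pvFindKAux (l : List Char) : Nat → Nat → Nat
  | 0, k => k
  | fuel + 1, k =>
    match PySem.List.pyGet? l (k : Int) with
    | some c => if c = '$' then pvFindKAux l fuel (k + 1) else k
    | none => k          -- Python raises IndexError here (outside Pre_)

def cleanDelimiters_alt (equation : String) : String :=
  String.ofList (pvReplaceAll (PySem.List.slice equation.toList
    (some ((pvFindKAux equation.toList (equation.toList.length + 1) 0 : Nat) : Int))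
    (some ((equation.toList.length : Int) - (pvFindKAux equation.toList (equation.toList.length + 1) 0 : Nat)))))

-- ===== PRECONDITION & SPEC =====
-- Pre_ excludes exactly the inputs where Python A raises IndexError: strings (including '')
-- whose first ceil(n/2) characters are all '$' (A's recursion strips them down to empty).
def Pre_cleanDelimiters (equation : String) : Prop :=
  ((equation.toList.take ((equation.toList.length + 1) / 2)).any (fun c => c ≠ '$')) = true
instance (equation : String) : Decidable (Pre_cleanDelimiters equation) := by
  unfold Pre_cleanDelimiters; infer_instance

def pvWitness_cleanDelimiters : String := "$\\(x+y\\)$"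

def Spec_cleanDelimiters (equation : String) (out : String) : Prop := out = cleanDelimiters_alt equation
instance (equation : String) (out : String) : Decidable (Spec_cleanDelimiters equation out) := by unfold Spec_cleanDelimiters; infer_instance

-- ===== CLAIM (what is proved, stated in full; the proofs are below) =====
def Claim_equal_cleanDelimiters : Prop := ∀ (equation : String), Dom_cleanDelimiters equation → Pre_cleanDelimiters equation → Spec_cleanDelimiters equation (cleanDelimiters equation)

-- ===== LEMMAS AND PROOFS =====

-- B's while-scan returns the first non-'$' index k0 when one exists before the end.
lemma pvFindKAux_spec (l : List Char) (k0 : Nat) (hk0 : k0 < l.length)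
    (hall : ∀ j (hj : j < k0), l[j]'(Nat.lt_trans hj hk0) = '$')
    (hne : l[k0] ≠ '$') :
    ∀ fuel i, i ≤ k0 → k0 - i < fuel → pvFindKAux l fuel i = k0 := by
  intro fuel
  induction fuel with
  | zero => intro i _ h; omega
  | succ f ih =>
    intro i hi hlt
    have hiLen : i < l.length := by omega
    have hgi : PySem.List.pyGet? l (i : Int) = some (l[i]'hiLen) := by
      rw [PySem.List.pyGet?_natCast]
      exact List.getElem?_eq_getElem hiLen
    rw [pvFindKAux, hgi]
    rcases Nat.lt_or_ge i k0 with hlt' | hge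
    · have : l[i] = '$' := hall i hlt'
      simp only [this]
      exact ih (i + 1) (by omega) (by omega)
    · have : i = k0 := by omega
      subst this
      simp [hne]

-- A's recursion, applied to a list whose first non-'$' index is k0 (in the first half),
-- equals the replace loop on the symmetric slice dropping k0 from each end.
lemma pvCleanAAux_spec :
    ∀ fuel (l : List Char) (k0 : Nat), l.length < fuel → k0 < (l.length + 1) / 2 →
    (∀ j, j < k0 → l[j]! = '$') → l[k0]! ≠ '$' →
    pvCleanAAux fuel l = pvReplaceAll ((l.drop k0).take (l.length - 2 * k0)) := by
  intro fuel
  induction fuel with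
  | zero => intro l k0 h; omega
  | succ f ih =>
    intro l k0 hfuel hk0 hall hne
    have hk0Len : k0 < l.length := by omega
    cases k0 with
    | zero =>
      have h0 : 0 < l.length := by omega
      have hget : PySem.List.pyGet? l 0 = some (l[0]'h0) := by
        rw [PySem.List.pyGet?_zero]
        exact List.getElem?_eq_getElem h0
      have hne0 : l[0]'h0 ≠ '$' := by
        simpa [getElem!_pos l 0 h0] using hne
      rw [pvCleanAAux, hget]
      simp [hne0]
    | succ m =>
      have hlen2 : 2 ≤ l.length := by omega
      have h0 : 0 < l.length := by omega
      have h0eq : l[0]'h0 = '$' := by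
        have := hall 0 (Nat.succ_pos m)
        simpa [getElem!_pos l 0 h0] using this
      have hget : PySem.List.pyGet? l 0 = some '$' := by
        rw [PySem.List.pyGet?_zero, List.getElem?_eq_getElem h0, h0eq]
      rw [pvCleanAAux, if_pos hget]
      have hcast : ((l.length : Int) - 1) = ((l.length - 1 : Nat) : Int) := by omega
      rw [hcast, show (1 : Int) = ((1 : Nat) : Int) from rfl, PySem.List.slice_natCast]
      set l' : List Char := (l.drop 1).take (l.length - 1 - 1) with hl'
      have hl'len : l'.length = l.length - 2 := by
        simp [hl']; omega
      have hidx : ∀ j (hj : j < l.length - 2), l'[j]'(by omega) = l[j+1]'(by omega) := by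
        intro j hj
        simp [hl', List.getElem_take]
      have step : pvCleanAAux f l' = pvReplaceAll ((l'.drop m).take (l'.length - 2 * m)) := by
        apply ih l' m
        · rw [hl'len]; omega
        · rw [hl'len]; omega
        · intro j hj
          have hjl : j < l'.length := by omega
          rw [getElem!_pos l' j hjl, hidx j (by omega)]
          have hj1 : j + 1 < l.length := by omega
          have := hall (j+1) (by omega)
          simpa [getElem!_pos l (j+1) hj1] using this
        · have hml : m < l'.length := by omega
          rw [getElem!_pos l' m hml, hidx m (by omega)]
          have hm1 : m + 1 < l.length := by omega
          simpa [getElem!_pos l (m+1) hm1] using hne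
      rw [step]
      congr 1
      rw [hl'len]
      rw [hl', List.drop_take, List.take_take, List.drop_drop]
      congr 1
      · omega
      · congr 1; omega

-- ===== VERDICT (by name: the statement is the Claim_ definition above) =====
theorem cleanDelimiters_spec : Claim_equal_cleanDelimiters := by
  intro eq _ hpre
  unfold Spec_cleanDelimiters
  simp only [cleanDelimiters, cleanDelimiters_alt]
  set l : List Char := eq.toList with hl
  rw [Pre_cleanDelimiters, List.any_eq_true] at hpre
  obtain ⟨c, hc, hcne⟩ := hpre
  rw [← hl] at hc
  simp only [decide_eq_true_eq] at hcne
  have hleq : l.length = eq.length := by rw [hl]; simp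
  -- k0 = the first non-'$' index; Pre_ puts it in the first half of the string
  obtain ⟨k0, hk0half, hall!, hne!⟩ :
      ∃ k0, k0 < (l.length + 1) / 2 ∧ (∀ j, j < k0 → l[j]! = '$') ∧ l[k0]! ≠ '$' := by
    have hexb : ∃ x ∈ l, (fun x => x ≠ '$' : Char → Bool) x :=
      ⟨c, List.mem_of_mem_take hc, by simp [hcne]⟩
    have hk0Len : l.findIdx (fun x => x ≠ '$' : Char → Bool) < l.length :=
      List.findIdx_lt_length_of_exists hexb
    refine ⟨l.findIdx (fun x => x ≠ '$' : Char → Bool), ?_, ?_, ?_⟩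
    · obtain ⟨j, hj, hjc⟩ := List.getElem_of_mem hc
      have hjlen : j < l.length := by
        simp [List.length_take] at hj; omega
      have hjhalf : j < (l.length + 1) / 2 := by
        simp [List.length_take] at hj; omega
      have hjtake : l[j]'hjlen = c := by
        rw [← hjc]; simp [List.getElem_take]
      have hk0le : l.findIdx (fun x => x ≠ '$' : Char → Bool) ≤ j := by
        by_contra hgt
        have := List.not_of_lt_findIdx (p := (fun x => x ≠ '$' : Char → Bool)) (xs := l)
          (by omega : j < l.findIdx (fun x => x ≠ '$' : Char → Bool))
        simp at this
        exact hcne (by rw [← hjtake]; exact this)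
      omega
    · intro j hj
      have := List.not_of_lt_findIdx (p := (fun x => x ≠ '$' : Char → Bool)) (xs := l) hj
      simp at this
      rw [getElem!_pos l j (by omega)]
      exact this
    · have := List.findIdx_getElem (p := (fun x => x ≠ '$' : Char → Bool)) (xs := l) (w := hk0Len)
      rw [getElem!_pos l _ hk0Len]
      simpa using this
  have hk0Len : k0 < l.length := by omega
  have hall : ∀ j (hj : j < k0), l[j]'(Nat.lt_trans hj hk0Len) = '$' := by
    intro j hj
    have := hall! j hj
    rwa [getElem!_pos l j (by omega)] at this
  have hne : l[k0]'hk0Len ≠ '$' := by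
    have := hne!
    rwa [getElem!_pos l k0 hk0Len] at this
  have hA := pvCleanAAux_spec (l.length + 1) l k0 (by omega) hk0half hall! hne!
  have hB := pvFindKAux_spec l k0 hk0Len hall hne (l.length + 1) 0 (by omega) (by omega)
  rw [hA, hB]
  have hcast : ((l.length : Int) - (k0 : Int)) = ((l.length - k0 : Nat) : Int) := by omega
  rw [hcast, PySem.List.slice_natCast]
  have harith : l.length - 2 * k0 = l.length - k0 - k0 := by omega
  rw [harith]
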